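-- pv_equiv track=rewrite | github.com/CelestynPark/PenArt_Reservation | app/policies/rules.py | require_consecutive_slots
-- ===== SOURCE A (Python) =====
-- from typing import Iterable, List, Tuple
--
-- def require_consecutive_slots(slot_time: Iterable[str], need: int = 2):
--     def to_minutes(hhmm: str) -> int:
--         h, m = hhmm.split(":")
--         return int(h) * 60 + int(m)
--
--     minutes = sorted(to_minutes(s) for s in set(slot_time))
--     if len(minutes) < need:
--         return False
--
--     streak = 1
--     for i in range(1, len(minutes)):
--         if minutes[i] - minutes[i - 1] == 60:
--             streak += 1
--             if streak >= need:
--                 return True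
--         else:
--             streak = 1
--     return False
-- ===== SOURCE B (Python) =====
-- def require_consecutive_slots(slot_time, need=2):
--     def to_minutes(hhmm):
--         h, m = hhmm.split(":")
--         return int(h) * 60 + int(m)
--
--     ms = sorted(to_minutes(s) for s in set(slot_time))
--     gaps = [b - a for a, b in zip(ms, ms[1:])]
--     w = max(need - 1, 1)  # a qualifying run always spans at least one 60-minute gap
--     return any(gaps[i:i + w] == [60] * w for i in range(len(gaps) - w + 1))
-- ===== Notes on version B (the rewrite author's own statement) =====
-- stated objective: alternative
-- what changed: B drops A's running streak counter with early return: it builds the list of gaps between sorted neighbouring minute values once and declaratively asks whether some window of max(need-1,1) consecutive gaps equals [60]*max(need-1,1).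
import Mathlib
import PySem

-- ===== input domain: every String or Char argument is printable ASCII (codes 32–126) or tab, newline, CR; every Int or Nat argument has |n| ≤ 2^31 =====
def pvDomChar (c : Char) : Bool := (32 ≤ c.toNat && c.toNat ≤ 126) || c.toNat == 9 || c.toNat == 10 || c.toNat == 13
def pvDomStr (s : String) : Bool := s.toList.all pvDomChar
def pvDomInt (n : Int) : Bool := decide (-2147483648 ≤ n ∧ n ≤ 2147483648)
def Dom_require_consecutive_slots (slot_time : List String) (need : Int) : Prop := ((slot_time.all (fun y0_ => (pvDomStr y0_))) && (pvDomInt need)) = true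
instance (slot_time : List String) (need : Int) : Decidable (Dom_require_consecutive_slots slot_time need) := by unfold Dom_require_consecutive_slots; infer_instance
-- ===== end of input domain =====

-- B replaces A's running streak counter (with early return) by building the list of
-- neighbour gaps once and testing whether some window of max(need-1,1) consecutive gaps
-- equals [60]*max(need-1,1); objective: alternative (declarative window test vs stateful scan).

-- ===== PORT A =====
-- to_minutes: 'h, m = hhmm.split(":")' raises unless exactly 2 pieces; int() via ofStr?
def toMinA? (s : String) : Option Int :=
  match PySem.Str.split? s ":" with
  | some [h, m] =>
    match PySem.Int.ofStr? h, PySem.Int.ofStr? m with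
    | some a, some b => some (a * 60 + b)
    | _, _ => none
  | _ => none

-- the 'for i in range(1, len(minutes))' loop: prev = minutes[i-1], streak as in A
def scanA (need : Int) (prev streak : Int) : List Int → Bool
  | [] => false
  | x :: rest =>
    if x - prev == 60 then
      (if streak + 1 ≥ need then true else scanA need x (streak + 1) rest)
    else scanA need x 1 rest

def require_consecutive_slots (slot_time : List String) (need : Int) : Bool :=
  match (PySem.Set.ofList slot_time).mapM toMinA? with
  | none => false   -- ValueError inside to_minutes: excluded by Pre_
  | some vals =>
    let minutes := PySem.List.sorted vals (fun v => v) false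
    if PySem.List.len minutes < need then false
    else
      match minutes with
      | [] => false
      | x :: rest => scanA need x 1 rest

-- ===== PORT B =====
def toMinB? (s : String) : Option Int :=
  match PySem.Str.split? s ":" with
  | some [h, m] =>
    match PySem.Int.ofStr? h, PySem.Int.ofStr? m with
    | some a, some b => some (a * 60 + b)
    | _, _ => none
  | _ => none

def require_consecutive_slots_alt (slot_time : List String) (need : Int) : Bool :=
  match (PySem.Set.ofList slot_time).mapM toMinB? with
  | none => false   -- ValueError inside to_minutes: excluded by Pre_
  | some vals =>
    let ms := PySem.List.sorted vals (fun v => v) false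
    let gaps := (ms.zip (PySem.List.slice ms (some 1) none)).map (fun p => p.2 - p.1)
    let w := max (need - 1) 1
    (PySem.List.pyRange 0 (PySem.List.len gaps - w + 1) 1).any
      (fun i => PySem.List.slice gaps (some i) (some (i + w)) == PySem.List.pyRepeat [(60 : Int)] w)

-- ===== PRECONDITION & SPEC =====
-- Pre_ excludes exactly the inputs on which A raises ValueError in to_minutes (a string
-- without exactly one ':' or with a piece int() rejects); B raises at the same place.
def parsesHHMM (s : String) : Bool :=
  match PySem.Str.split? s ":" with
  | some [h, m] => (PySem.Int.ofStr? h).isSome && (PySem.Int.ofStr? m).isSome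
  | _ => false

def Pre_require_consecutive_slots (slot_time : List String) (need : Int) : Prop :=
  ∀ s ∈ slot_time, parsesHHMM s = true
instance (slot_time : List String) (need : Int) : Decidable (Pre_require_consecutive_slots slot_time need) := by
  unfold Pre_require_consecutive_slots; infer_instance

def pvWitness_require_consecutive_slots : List String × Int := (["10:00", "11:00", "13:30"], 2)

def Spec_require_consecutive_slots (slot_time : List String) (need : Int) (out : Bool) : Prop := out = require_consecutive_slots_alt slot_time need
instance (slot_time : List String) (need : Int) (out : Bool) : Decidable (Spec_require_consecutive_slots slot_time need out) := by unfold Spec_require_consecutive_slots; infer_instance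

-- ===== CLAIM (what is proved, stated in full; the proofs are below) =====
def Claim_equal_require_consecutive_slots : Prop := ∀ (slot_time : List String) (need : Int), Dom_require_consecutive_slots slot_time need → Pre_require_consecutive_slots slot_time need → Spec_require_consecutive_slots slot_time need (require_consecutive_slots slot_time need)

-- ===== LEMMAS AND PROOFS =====

-- list of gaps between neighbours (proof-side name for what both ports traverse)
def gapsOf : List Int → List Int
  | [] => []
  | [_] => []
  | x :: y :: r => (y - x) :: gapsOf (y :: r)

theorem gapsOf_length : ∀ l : List Int, (gapsOf l).length = l.length - 1
  | [] => rfl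
  | [_] => rfl
  | _ :: y :: r => by simp [gapsOf, gapsOf_length (y :: r)]

-- B's zip/map expression computes gapsOf
theorem zip_map_eq_gapsOf : ∀ ms : List Int,
    (ms.zip (PySem.List.slice ms (some 1) none)).map (fun p : Int × Int => p.2 - p.1) = gapsOf ms
  | [] => rfl
  | [_] => rfl
  | x :: y :: r => by
      have ih := zip_map_eq_gapsOf (y :: r)
      rw [PySem.List.slice_from_one] at ih ⊢
      simp only [List.tail_cons] at ih ⊢
      simp [gapsOf, ih]

-- A's scan, re-expressed over the gap list
def scanG (need c : Int) : List Int → Bool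
  | [] => false
  | d :: t =>
    if d == 60 then (if c + 1 ≥ need then true else scanG need (c + 1) t)
    else scanG need 1 t

theorem scanA_eq_scanG (need : Int) : ∀ (rest : List Int) (prev c : Int),
    scanA need prev c rest = scanG need c (gapsOf (prev :: rest))
  | [], _, _ => rfl
  | x :: r, prev, c => by
      simp only [scanA, gapsOf, scanG]
      by_cases h : x - prev = 60 <;>
        simp [h, scanA_eq_scanG need r x (c + 1), scanA_eq_scanG need r x 1]

theorem scanG_low (need : Int) (h : need ≤ 2) :
    ∀ g : List Int, scanG need 1 g = true ↔ [(60 : Int)] <:+: g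
  | [] => by simp [scanG]
  | d :: t => by
      by_cases hd : d = (60 : Int)
      · subst hd
        have h2 : (1 : Int) + 1 ≥ need := by omega
        simp only [scanG, beq_self_eq_true, if_true, if_pos h2, true_iff]
        exact ⟨[], t, rfl⟩
      · simp only [scanG, beq_iff_eq, hd, if_false]
        rw [scanG_low need h t, List.infix_cons_iff]
        constructor
        · exact Or.inr
        · rintro (hp | hi)
          · rcases List.cons_prefix_cons.mp hp with ⟨h60, _⟩; exact absurd h60.symm hd
          · exact hi

theorem scanG_high (need : Int) (hn : 3 ≤ need) :
    ∀ (g : List Int) (c : Int), 1 ≤ c → c < need →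
    (scanG need c g = true ↔
      (List.replicate (need - c).toNat (60 : Int) <+: g ∨
       List.replicate (need - 1).toNat (60 : Int) <:+: g))
  | [], c => by
      intro h1 h2
      simp only [scanG, Bool.false_eq_true, false_iff]
      rintro (hp | hi)
      · have := hp.length_le; simp only [List.length_replicate, List.length_nil] at this; omega
      · have := hi.sublist.length_le; simp only [List.length_replicate, List.length_nil] at this; omega
  | d :: t, c => by
      intro h1 h2
      by_cases hd : d = (60 : Int)
      · subst hd
        simp only [scanG, beq_self_eq_true, if_true]
        by_cases htr : c + 1 ≥ need
        · have hc1 : (need - c).toNat = 1 := by omega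
          simp only [htr, if_pos, true_iff]
          exact Or.inl (by rw [hc1]; exact List.cons_prefix_cons.mpr ⟨rfl, List.nil_prefix⟩)
        · simp only [htr, if_neg, not_false_iff]
          rw [scanG_high need hn t (c + 1) (by omega) (by omega)]
          have hsp : (need - c).toNat = (need - (c + 1)).toNat + 1 := by omega
          have hwp : (need - 1).toNat = (need - 2).toNat + 1 := by omega
          constructor
          · rintro (hp | hi)
            · exact Or.inl (by rw [hsp, List.replicate_succ]; exact List.cons_prefix_cons.mpr ⟨rfl, hp⟩)
            · exact Or.inr (List.infix_cons hi)
          · rintro (hp | hi)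
            · rw [hsp, List.replicate_succ] at hp
              exact Or.inl (List.cons_prefix_cons.mp hp).2
            · rcases List.infix_cons_iff.mp hi with hpre | hinf
              · -- a full run starts right here: it also covers the (need-c)-prefix demand
                rw [hwp, List.replicate_succ] at hpre
                have hp2 : List.replicate (need - 2).toNat (60 : Int) <+: t :=
                  (List.cons_prefix_cons.mp hpre).2
                have hle : (need - (c + 1)).toNat ≤ (need - 2).toNat := by omega
                have : List.replicate (need - (c + 1)).toNat (60 : Int) <+:
                       List.replicate (need - 2).toNat (60 : Int) := by
                  conv_rhs => rw [show (need - 2).toNat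
                    = (need - (c + 1)).toNat + ((need - 2).toNat - (need - (c + 1)).toNat) by omega]
                  rw [List.replicate_add]
                  exact List.prefix_append _ _
                exact Or.inl (this.trans hp2)
              · exact Or.inr hinf
      · simp only [scanG, beq_iff_eq, hd, if_false]
        rw [scanG_high need hn t 1 (by omega) (by omega)]
        have h11 : (need - 1).toNat = (need - 1).toNat := rfl
        constructor
        · rintro (hp | hi)
          · exact Or.inr (List.infix_cons_iff.mpr (Or.inr hp.isInfix))
          · exact Or.inr (List.infix_cons hi)
        · rintro (hp | hi)
          · -- head of the replicate would have to be d ≠ 60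
            have hk : (need - c).toNat ≠ 0 := by omega
            rw [show (need - c).toNat = ((need - c).toNat - 1) + 1 by omega,
                List.replicate_succ] at hp
            exact absurd ((List.cons_prefix_cons.mp hp).1).symm hd
          · rcases List.infix_cons_iff.mp hi with hpre | hinf
            · have hw : (need - 1).toNat ≠ 0 := by omega
              rw [show (need - 1).toNat = ((need - 1).toNat - 1) + 1 by omega,
                  List.replicate_succ] at hpre
              exact absurd ((List.cons_prefix_cons.mp hpre).1).symm hd
            · exact Or.inr hinf

-- A's whole minutes phase, characterised as an infix condition on the gap list
theorem Aside_iff (ms : List Int) (need : Int) :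
    (if PySem.List.len ms < need then false
     else match ms with
       | [] => false
       | x :: rest => scanA need x 1 rest) = true
    ↔ List.replicate (max (need - 1) 1).toNat (60 : Int) <:+: gapsOf ms := by
  have hw1 : 1 ≤ (max (need - 1) 1).toNat := by omega
  by_cases hg : PySem.List.len ms < need
  · rw [if_pos hg]
    simp only [Bool.false_eq_true, false_iff]
    intro hinf
    have hlen := hinf.sublist.length_le
    rw [List.length_replicate, gapsOf_length] at hlen
    simp only [PySem.List.len_eq] at hg
    omega
  · rw [if_neg hg]
    cases ms with
    | nil =>
        show false = true ↔ _
        simp only [Bool.false_eq_true, false_iff]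
        intro hinf
        have := hinf.sublist.length_le
        simp [gapsOf] at this
    | cons x rest =>
        show scanA need x 1 rest = true ↔ _
        rw [scanA_eq_scanG need rest x 1]
        by_cases hn : need ≤ 2
        · have : (max (need - 1) 1).toNat = 1 := by omega
          rw [this]
          simpa using scanG_low need hn (gapsOf (x :: rest))
        · have hmx : (max (need - 1) 1).toNat = (need - 1).toNat := by omega
          rw [hmx, scanG_high need (by omega) (gapsOf (x :: rest)) 1 le_rfl (by omega)]
          constructor
          · rintro (hp | hi)
            · exact hp.isInfix
            · exact hi
          · intro hi
            exact Or.inr hi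

-- B's window test, characterised by the same infix condition
theorem Bside_iff (g : List Int) (need : Int) :
    ((PySem.List.pyRange 0 (PySem.List.len g - max (need - 1) 1 + 1) 1).any
      (fun i => PySem.List.slice g (some i) (some (i + max (need - 1) 1)) ==
        PySem.List.pyRepeat [(60 : Int)] (max (need - 1) 1))) = true
    ↔ List.replicate (max (need - 1) 1).toNat (60 : Int) <:+: g := by
  set w : Int := max (need - 1) 1 with hw
  have hw1 : (1 : Int) ≤ w := le_max_right _ _
  have hwc : ((w.toNat : Int)) = w := by omega
  rw [List.any_eq_true]
  constructor
  · rintro ⟨i, hi, hpred⟩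
    rw [PySem.List.mem_pyRange_one] at hi
    have h0i : (0 : Int) ≤ i := hi.1
    have hslice : PySem.List.slice g (some i) (some (i + w)) = (g.drop i.toNat).take w.toNat := by
      rw [show i = ((i.toNat : Nat) : Int) by omega, show (w : Int) = ((w.toNat : Nat) : Int) from hwc.symm,
          PySem.List.slice_natCast_add]
      simp only [Int.toNat_natCast]
    rw [hslice, PySem.List.pyRepeat_singleton 60 w, beq_iff_eq] at hpred
    rw [← hpred]
    exact ((g.drop i.toNat).take_prefix w.toNat).isInfix.trans (g.drop_suffix i.toNat).isInfix
  · rintro ⟨s, t, hst⟩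
    have hlg : g.length = s.length + w.toNat + t.length := by
      rw [← hst]; simp [List.length_append]; omega
    refine ⟨(s.length : Int), ?_, ?_⟩
    · rw [PySem.List.mem_pyRange_one]
      refine ⟨Int.natCast_nonneg _, ?_⟩
      simp only [PySem.List.len_eq]
      omega
    · have hslice : PySem.List.slice g (some ((s.length : Nat) : Int)) (some (((s.length : Nat) : Int) + w))
          = (g.drop s.length).take w.toNat := by
        rw [show (w : Int) = ((w.toNat : Nat) : Int) from hwc.symm, PySem.List.slice_natCast_add]
        simp only [Int.toNat_natCast]
      have hdrop : g.drop s.length = List.replicate w.toNat 60 ++ t := by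
        rw [← hst, List.append_assoc, List.drop_left]
      rw [hslice, PySem.List.pyRepeat_singleton 60 w, beq_iff_eq, hdrop,
          List.take_left' (by simp)]

-- ===== VERDICT (by name: the statement is the Claim_ definition above) =====
theorem require_consecutive_slots_spec : Claim_equal_require_consecutive_slots := by
  intro st need _ _
  unfold Spec_require_consecutive_slots
  show require_consecutive_slots st need = require_consecutive_slots_alt st need
  unfold require_consecutive_slots require_consecutive_slots_alt
  have hBA : toMinB? = toMinA? := rfl
  rw [hBA]
  cases hm : (PySem.Set.ofList st).mapM toMinA? with
  | none => rfl
  | some vals =>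
      dsimp only
      rw [Bool.eq_iff_iff, Aside_iff, zip_map_eq_gapsOf, Bside_iff]
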